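-- pv_equiv track=rewrite | github.com/Joshuawcox5/electrum-dash | electrum_dash/tests/test_protx.py | _strip_platform_fields
-- ===== SOURCE A (Python) =====
-- def _strip_platform_fields(d: dict) -> dict:
--     d = dict(d)
--     for k in (
--         'platform_node_id',
--         'platform_p2p_port',
--         'platform_http_port',
--         'platform_ed25519_privkey',
--         'platform_ed25519_pubkey',
--     ):
--         d.pop(k, None)
--     return d
-- ===== SOURCE B (Python) =====
-- _PLATFORM_KEYS = frozenset({
--     'platform_node_id',
--     'platform_p2p_port',
--     'platform_http_port',
--     'platform_ed25519_privkey',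
--     'platform_ed25519_pubkey',
-- })
--
--
-- def _strip_platform_fields(d: dict) -> dict:
--     return {k: v for k, v in d.items() if k not in _PLATFORM_KEYS}
-- ===== Notes on version B (the rewrite author's own statement) =====
-- stated objective: idiomatic
-- what changed: B builds the result in one dict comprehension that iterates over d's entries and filters by a fixed frozenset of platform keys, instead of copying the dict and then popping five named keys one by one.
import Mathlib
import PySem

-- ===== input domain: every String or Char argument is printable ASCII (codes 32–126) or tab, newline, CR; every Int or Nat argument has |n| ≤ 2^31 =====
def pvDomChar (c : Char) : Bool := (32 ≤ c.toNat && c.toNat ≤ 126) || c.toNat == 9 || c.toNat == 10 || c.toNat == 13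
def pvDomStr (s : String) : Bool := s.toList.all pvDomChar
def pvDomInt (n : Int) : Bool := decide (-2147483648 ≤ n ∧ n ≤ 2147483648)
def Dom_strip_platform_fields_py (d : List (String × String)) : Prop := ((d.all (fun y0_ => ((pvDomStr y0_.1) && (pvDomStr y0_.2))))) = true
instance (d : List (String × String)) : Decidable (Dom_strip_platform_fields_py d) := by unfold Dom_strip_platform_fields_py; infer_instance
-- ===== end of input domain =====

-- B replaces "copy the dict, then pop five named platform keys" by a single dict
-- comprehension over d's entries filtered against a fixed key set (idiomatic; same cost).


-- ===== PORT A =====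
-- d = dict(d); for k in (...): d.pop(k, None); return d
-- (d.pop(k, None) discards the value, so the dict after it is d.erase k)
def strip_platform_fields_py (d : List (String × String)) : List (String × String) :=
  ((["platform_node_id", "platform_p2p_port", "platform_http_port",
     "platform_ed25519_privkey", "platform_ed25519_pubkey"] : List String).foldl
    (fun dd k => dd.erase k) (PySem.Dict.ofList d)).items

-- ===== PORT B =====
def pvPlatformKeys : PySem.Set String :=
  PySem.Set.ofList ["platform_node_id", "platform_p2p_port", "platform_http_port",
                    "platform_ed25519_privkey", "platform_ed25519_pubkey"]

-- {k: v for k, v in d.items() if k not in _PLATFORM_KEYS}: the comprehension builds a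
-- dict from the kept (k, v) pairs of d in order, i.e. Dict.ofList of the filtered list.
def strip_platform_fields_py_alt (d : List (String × String)) : List (String × String) :=
  (PySem.Dict.ofList
    (d.filter (fun p => !(PySem.Set.contains pvPlatformKeys p.1)))).items

-- ===== PRECONDITION & SPEC =====
-- Pre_ excludes association lists with duplicate keys: they do not represent a Python
-- dict, which is the declared parameter type of _strip_platform_fields.
def Pre_strip_platform_fields_py (d : List (String × String)) : Prop :=
  (d.map Prod.fst).Nodup
instance (d : List (String × String)) : Decidable (Pre_strip_platform_fields_py d) := by
  unfold Pre_strip_platform_fields_py; infer_instance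

def pvWitness_strip_platform_fields_py : (List (String × String)) :=
  [("platform_node_id", "ab"), ("owner", "xy")]

def Spec_strip_platform_fields_py (d : List (String × String)) (out : List (String × String)) : Prop := out = strip_platform_fields_py_alt d
instance (d : List (String × String)) (out : List (String × String)) : Decidable (Spec_strip_platform_fields_py d out) := by unfold Spec_strip_platform_fields_py; infer_instance

-- ===== CLAIM (what is proved, stated in full; the proofs are below) =====
def Claim_equal_strip_platform_fields_py : Prop := ∀ (d : List (String × String)), Dom_strip_platform_fields_py d → Pre_strip_platform_fields_py d → Spec_strip_platform_fields_py d (strip_platform_fields_py d)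

-- ===== LEMMAS AND PROOFS =====

-- Dict.ofList of a list whose keys are distinct has exactly that list as items.
theorem pv_ofList_items_of_nodup (l : List (String × String))
    (h : (l.map Prod.fst).Nodup) : (PySem.Dict.ofList l).items = l := by
  have hfresh : ∀ a ∈ l, (PySem.Dict.empty : PySem.Dict String String).contains a.1 = false := by
    intro a _; simp [PySem.Dict.contains, PySem.Dict.empty]
  have := PySem.Dict.items_foldl_insert_fresh l Prod.fst Prod.snd PySem.Dict.empty hfresh h
  simpa [PySem.Dict.ofList, PySem.Dict.update, PySem.Dict.empty] using this

-- The two filter predicates agree pointwise.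
theorem pv_pred_eq (p : String × String) :
    (!(p.1 == "platform_ed25519_pubkey") &&
      (!(p.1 == "platform_ed25519_privkey") &&
        (!(p.1 == "platform_http_port") &&
          (!(p.1 == "platform_p2p_port") && !(p.1 == "platform_node_id")))))
      = !(PySem.Set.contains pvPlatformKeys p.1) := by
  have hk : pvPlatformKeys = ["platform_node_id", "platform_p2p_port", "platform_http_port",
      "platform_ed25519_privkey", "platform_ed25519_pubkey"] := by decide
  rw [hk]
  simp only [PySem.Set.contains, List.contains, List.elem]
  cases h1 : p.1 == "platform_node_id" <;>
  cases h2 : p.1 == "platform_p2p_port" <;>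
  cases h3 : p.1 == "platform_http_port" <;>
  cases h4 : p.1 == "platform_ed25519_privkey" <;>
  cases h5 : p.1 == "platform_ed25519_pubkey" <;>
  simp_all

-- ===== VERDICT (by name: the statement is the Claim_ definition above) =====
theorem strip_platform_fields_py_spec : Claim_equal_strip_platform_fields_py := by
  intro d _ hpre
  unfold Spec_strip_platform_fields_py
  unfold strip_platform_fields_py strip_platform_fields_py_alt
  have hA : (PySem.Dict.ofList d).items = d := pv_ofList_items_of_nodup d hpre
  have hnodupF :
      ((d.filter (fun p => !(PySem.Set.contains pvPlatformKeys p.1))).map Prod.fst).Nodup := by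
    exact List.Nodup.sublist (List.Sublist.map Prod.fst List.filter_sublist) hpre
  rw [pv_ofList_items_of_nodup _ hnodupF]
  simp only [List.foldl, PySem.Dict.erase, hA, List.filter_filter]
  apply List.filter_congr
  intro p _
  exact pv_pred_eq p
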